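/- GENERATED by mk_final_copies.py from the proof of the farm's unit `start_decoder.9a` (farm:start_decoder.9a.1: Proof.lean) as the
   re-elaboration sweep compiled it — do not edit. -/
import Asan.CheckWalk
import Vorbis.Spec.Units.start_decoder_9a

/-!
  Unit `start_decoder.9a`: a child of the split of segment `.9` of start_decoder (Vorbis/Spec/StartDecoder9.lean: the cut assertion
  `In9`, the claims, `Seg9.of_parts`). The walk is the farm worker's (unit start_decoder.9, attempt 1) over the carry layer of
  Vorbis/Spec/StartDecoder1.lean (`P1.sd2_carry`, `P1.frame_carry`, `P1.layout_facts`, `P1.wmax_ok`) and the exit lemmas of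
  `Vorbis.Spec.StartDecoder.S9` (`mid_exit`, `err_exit`, `err4_exit`).
-/

open X86 X86.User Asan Vorbis Vorbis.Spec Vorbis.Spec.StartDecoder Vorbis.Spec.StartDecoder.P1 Vorbis.Spec.StartDecoder.S9

set_option maxRecDepth 4000
set_option maxHeartbeats 4000000

namespace Vorbis.Spec.start_decoder_9a

/-- **THE FIRST PART OF SEGMENT `.9`, PROVED** (0x114184 … 0x114199: `call start_packet ; test eax, eax ; je 113b22 ; call crc32_init`):
from the entry assertion `At9` the machine reaches the epilogue's assertion `AtERR` (start_packet returned 0: exit 1 of the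
segment) or the proposed cut assertion `In9` at `cut71` = 0x114199. Shows that the lemmas above (`sd2_carry`, `frame_carry`,
`err_exit`, `mid_exit`) do the whole carrying at a call site: what remains per call is the callee's precondition and the
footprint bookkeeping (`u_same`, `sameExcept_through_callee`, `v_untouched`). 24 s. -/
theorem seg9a (Lay : Layout) (hLay : Lay.hi = 0x1000000) (μ : Microarch) (hμ : UserX.MicroOK μ) (u₀ : State)
    (hcode : HasCodeNat Lay u₀ Vorbis.L.start_decoder.entry Vorbis.Code.code_start_decoder.nat Vorbis.L.start_decoder.size)
    (h_sp : ∀ (others : List Obj) (frames : List (Nat × FrameLayout)) (Blk : Block → Prop) (len : Nat),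
      Calls Lay μ Vorbis.WayInv (Vorbis.conv u₀) Vorbis.L.start_packet.entry (Vorbis.Spec.start_packet.spec others frames Blk len))
    (h_crc : ∀ (others : List Obj) (frames : List (Nat × FrameLayout)),
      Calls Lay μ Vorbis.WayInv (Vorbis.conv u₀) Vorbis.L.crc32_init.entry (Vorbis.Spec.crc32_init.spec others frames))
    (g : Ghost) (v : State) (hat : At9 u₀ g v) :
    ReachVia Lay μ WayInv v (fun w => (∃ A, In9 u₀ g Vorbis.L.start_decoder.cut71 A w) ∨ AtERR u₀ g w) := by
  obtain ⟨A, hb⟩ := hat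
  have he := hb.frame.entry
  v_entry he
  simp only [depth] at he_room he_stack
  have hsp' := h_sp A.2 g.frames' (g.Blk A) g.len
  have hlay := layout_facts hb.frame hb.hand hb.sd
  have eRA : g.RA = (g.e.reg .rsp).toNat := rfl
  have ef : g.f = (g.e.reg .rdi).toNat := rfl
  rw [eRA, ef] at hlay
  obtain ⟨hRA, hR8, _, _, hfstack, hflo, hfhi, hflog, hfcrc, hfout, hAstack, hAcrc, hAhi, hAlo⟩ := hlay
  have w_rip := hb.frame.rip
  have w_rsp : v.reg .rsp = g.e.reg .rsp - 1480 := by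
    rw [hb.frame.rsp]
    apply UInt64.toNat_inj.mp
    rw [toNat_addr _ (by omega)]
    u_omega
  have w_rbp : v.reg .rbp = g.e.reg .rdi := by
    rw [hb.rbp]
    exact addr_toNat _
  have hRw : g.e.reg .rsp - 1480 = addr g.R := by
    rw [← w_rsp]
    exact hb.frame.rsp
  have c_rsp := w_rsp
  have c_rbp := w_rbp
  have w_eq : Mem.EqOn Vorbis.L.textLo Vorbis.L.textHi u₀.mem v.mem := hb.frame.code
  have hdf : v.flags .df = false := (show abiInv _ from hb.frame.inv).1
  have hmx : v.mxcsr &&& 0x1F80 = 0x1F80 := (show abiInv _ from hb.frame.inv).2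
  have hsse := Vorbis.sseOK_of_abiInv hb.frame.inv
  have henvR : ReaderEnv A.2 g.frames' (g.Blk A) g.len g.f := readerEnv hb.hand hb.sd.env.live
  u_walk hcode [hμ.vendor] span [Vorbis.L.textLo, Vorbis.L.textHi] side (v_side)
  case call_inv =>
    v_inv
  case pre_114187 =>
    have hun : ShadowUntouched v.mem s_114187.mem := by v_untouched
    have hrsp8 : (s_114187.reg .rsp).toNat + 8 = g.R := by
      rw [w_rsp]
      u_omega
    refine ⟨⟨?_, hb.frame.offText⟩, ?_, ?_⟩
    · rw [hrsp8]
      exact hb.frame.shadow.untouched hun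
    · rw [w_rdi, ← ef]
      exact henvR
    · rw [w_rdi, ← ef, w_mem]
      have hlt : (g.e.reg Reg.rsp - 1488).toNat + 8 ≤ 2 ^ 64 := by u_omega
      exact (Reader.store_off_obj hb.sd.bits _ 8 _ hlt (by u_omega)).1.bits
  -- after start_packet (0x11418c)
  v_after_call w_rsp_114187 w_mem_114187
  simp only [w_rdi_114187] at w_same
  have hpost1 : StartPacketPost (g.Blk A) g.len (s_114187.reg .rdi).toNat s_114187 s_114187r := w_post
  rw [w_rdi_114187, ← ef] at hpost1
  obtain ⟨z1, w_rax⟩ : ∃ z, s_114187r.reg .rax = z := ⟨_, rfl⟩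
  have hsame1 : Mem.SameExcept
      [⟨(g.e.reg .rsp).toNat - 1888, (g.e.reg .rsp).toNat - 1480⟩,
       ⟨(g.e.reg .rdi).toNat + 48, (g.e.reg .rdi).toNat + 56⟩, ⟨(g.e.reg .rdi).toNat + 84, (g.e.reg .rdi).toNat + 96⟩,
       ⟨(g.e.reg .rdi).toNat + 136, (g.e.reg .rdi).toNat + 144⟩, ⟨(g.e.reg .rdi).toNat + 1484, (g.e.reg .rdi).toNat + 1749⟩,
       ⟨(g.e.reg .rdi).toNat + 1752, (g.e.reg .rdi).toNat + 1784⟩] v.mem s_114187r.mem := by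
    u_same
  have hun1 : ShadowUntouched v.mem s_114187r.mem := by v_untouched
  have hcrc' := h_crc A.2 g.frames'
  u_walk hcode [hμ.vendor] until [Vorbis.L.start_decoder.cut4] span [Vorbis.L.textLo, Vorbis.L.textHi] side (v_side)
  case cont =>
    -- exit 1 (0x11418e `je 113b22`): start_packet returned 0
    refine ReachVia.done (Or.inr ?_)
    have hsameE : Mem.SameExcept
        [⟨(g.e.reg .rsp).toNat - 1888, (g.e.reg .rsp).toNat - 1480⟩,
         ⟨(g.e.reg .rsp).toNat - 1320, (g.e.reg .rsp).toNat - 1314⟩,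
         ⟨(g.e.reg .rdi).toNat + 48, (g.e.reg .rdi).toNat + 56⟩, ⟨(g.e.reg .rdi).toNat + 84, (g.e.reg .rdi).toNat + 96⟩,
         ⟨(g.e.reg .rdi).toNat + 136, (g.e.reg .rdi).toNat + 144⟩, ⟨(g.e.reg .rdi).toNat + 1484, (g.e.reg .rdi).toNat + 1749⟩,
         ⟨(g.e.reg .rdi).toNat + 1752, (g.e.reg .rdi).toNat + 1784⟩,
         ⟨0x121c00, 0x121c00 + 1024⟩] v.mem s_11418e.mem := by
      rw [w_mem]
      u_same
    have hunE : ShadowUntouched v.mem s_11418e.mem := by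
      rw [w_mem]
      exact hun1
    have hbitsE : Bits (g.Blk A) g.len s_11418e.mem g.f := by
      rw [w_mem]
      exact hpost1.reader.bits
    have hinvE : abiInv s_11418e := by v_inv
    have hraxE : (s_11418e.reg .rax).toNat % 2 ^ 32 = 0 := by
      rw [w_rax, ← Vorbis.toNat_part32]
      exact hbr_11418e
    exact err_exit (S9.of_body9 hb) hsameE hunE hbitsE w_rip (by rw [w_rsp]; exact hRw) w_eq hinvE hraxE
  case call_inv =>
    v_inv
  case pre_114194 =>
    -- crc32_init: the shadow clause and `crc_table` as a live object
    have hun : ShadowUntouched v.mem s_114194.mem := by v_untouched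
    have hrsp8 : (s_114194.reg .rsp).toNat + 8 = g.R := by
      rw [w_rsp]
      u_omega
    refine ⟨⟨?_, hb.frame.offText⟩, ?_⟩
    · rw [hrsp8]
      exact hb.frame.shadow.untouched hun
    · exact ⟨_, List.mem_append_right _ hb.hand.g_crc, Nat.le_refl _, Nat.le_refl _⟩
  -- after crc32_init (0x114199)
  v_after_call w_rsp_114194 w_mem_114194
  refine ReachVia.done (Or.inl ⟨A, ?_⟩)
  have hlt : (g.e.reg Reg.rsp - 1488).toNat + 8 ≤ 2 ^ 64 := by u_omega
  have hsameA : Mem.SameExcept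
      [⟨(g.e.reg .rsp).toNat - 1888, (g.e.reg .rsp).toNat - 1480⟩,
       ⟨(g.e.reg .rsp).toNat - 1320, (g.e.reg .rsp).toNat - 1314⟩,
       ⟨(g.e.reg .rdi).toNat + 48, (g.e.reg .rdi).toNat + 56⟩, ⟨(g.e.reg .rdi).toNat + 84, (g.e.reg .rdi).toNat + 96⟩,
       ⟨(g.e.reg .rdi).toNat + 136, (g.e.reg .rdi).toNat + 144⟩, ⟨(g.e.reg .rdi).toNat + 1484, (g.e.reg .rdi).toNat + 1749⟩,
       ⟨(g.e.reg .rdi).toNat + 1752, (g.e.reg .rdi).toNat + 1784⟩,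
       ⟨0x121c00, 0x121c00 + 1024⟩] v.mem (s_114187r.mem.writeLE (g.e.reg Reg.rsp - 1488) 8 1130905) := by
    u_same
  have hsame2 : Mem.SameExcept
      [⟨(g.e.reg .rsp).toNat - 1888, (g.e.reg .rsp).toNat - 1480⟩,
       ⟨(g.e.reg .rsp).toNat - 1320, (g.e.reg .rsp).toNat - 1314⟩,
       ⟨(g.e.reg .rdi).toNat + 48, (g.e.reg .rdi).toNat + 56⟩, ⟨(g.e.reg .rdi).toNat + 84, (g.e.reg .rdi).toNat + 96⟩,
       ⟨(g.e.reg .rdi).toNat + 136, (g.e.reg .rdi).toNat + 144⟩, ⟨(g.e.reg .rdi).toNat + 1484, (g.e.reg .rdi).toNat + 1749⟩,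
       ⟨(g.e.reg .rdi).toNat + 1752, (g.e.reg .rdi).toNat + 1784⟩,
       ⟨0x121c00, 0x121c00 + 1024⟩] v.mem s_114194r.mem := by
    refine Vorbis.Spec.Reader.sameExcept_through_callee hsameA w_same ?_
    simp only [List.forall_mem_cons, List.not_mem_nil, false_imp_iff, implies_true, and_true, X86.User.inSpans_cons,
      X86.User.inSpans_nil, or_false]
    repeat' apply And.intro
    all_goals u_omega
  have hun2 : ShadowUntouched v.mem s_114194r.mem := by v_untouched
  have hbits2 : Bits (g.Blk A) g.len s_114194r.mem g.f := by
    have hb1 := (Reader.store_off_obj hpost1.reader.bits (g.e.reg Reg.rsp - 1488) 8 1130905 hlt (by u_omega)).1.bits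
    refine bits_off hb1 w_same ?_
    simp only [List.forall_mem_cons, List.not_mem_nil, false_imp_iff, implies_true, and_true]
    repeat' apply And.intro
    all_goals u_omega
  have hinv2 : abiInv s_114194r := by v_inv
  have hrbp2 : s_114194r.reg .rbp = addr g.f := by
    rw [w_kept .rbp rfl]
    exact hb.rbp
  exact mid_exit (S9.of_body9 hb) hsame2 hun2 hbits2 w_rip (by rw [w_rsp]; exact hRw) w_eq hinv2 hrbp2

end Vorbis.Spec.start_decoder_9a

/-- **Unit `start_decoder.9a`** (0x114184 … 0x114194: `start_packet(f)`, `crc32_init()`): the walk `seg9a` above. -/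
theorem Vorbis.Spec.Worked.start_decoder_9a_ok : Vorbis.Spec.start_decoder_9a.Statement := by
  intro Lay hLay μ hμ u₀ hcode h_start_packet h_crc32_init g v hat
  exact Vorbis.Spec.start_decoder_9a.seg9a Lay hLay μ hμ u₀ hcode h_start_packet h_crc32_init g v hat
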